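-- pv_equiv track=rewrite | github.com/wowonjin/nova_ai_landing | nova-ai/script_runner.py | _repair_multiline_calls
-- ===== SOURCE A (Python) =====
-- from typing import Callable, Dict, List
--
-- def _repair_multiline_calls(lines: List[str]) -> List[str]:
--     def _count_unescaped(text: str, quote: str) -> int:
--         count = 0
--         escaped = False
--         for ch in text:
--             if escaped:
--                 escaped = False
--                 continue
--             if ch == "\\":
--                 escaped = True
--                 continue
--             if ch == quote:
--                 count += 1
--         return count
--
--     repaired: List[str] = []
--     buffer: List[str] = []
--     quote_char: str | None = None
--     for line in lines:
--         if quote_char is None: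
--             if "insert_text(" in line or "insert_equation(" in line or "insert_latex_equation(" in line:
--                 if _count_unescaped(line, "'") % 2 == 1:
--                     quote_char = "'"
--                     buffer = [line]
--                     continue
--                 if _count_unescaped(line, '"') % 2 == 1:
--                     quote_char = '"'
--                     buffer = [line]
--                     continue
--             repaired.append(line)
--         else:
--             buffer.append(line)
--             count = sum(_count_unescaped(chunk, quote_char) for chunk in buffer)
--             if count % 2 == 0:
--                 joined = " ".join(part.strip() for part in buffer)
--                 repaired.append(joined)
--                 buffer = []
--                 quote_char = None
--     if buffer:
--         joined = " ".join(part.strip() for part in buffer)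
--         if quote_char == "'" and not joined.strip().endswith("')"):
--             joined = f"{joined}')"
--         elif quote_char == '"' and not joined.strip().endswith('")'):
--             joined = f'{joined}")'
--         repaired.append(joined)
--     return repaired
-- ===== SOURCE B (Python) =====
-- from typing import List
--
-- def _repair_multiline_calls(lines: List[str]) -> List[str]:
--     def _count_unescaped(text: str, quote: str) -> int:
--         count = 0
--         escaped = False
--         for ch in text:
--             if escaped:
--                 escaped = False
--                 continue
--             if ch == "\\":
--                 escaped = True
--                 continue
--             if ch == quote:
--                 count += 1
--         return count
--
--     def _start_quote(line: str):
--         if ("insert_text(" in line or "insert_equation(" in line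
--                 or "insert_latex_equation(" in line):
--             if _count_unescaped(line, "'") % 2 == 1:
--                 return "'"
--             if _count_unescaped(line, '"') % 2 == 1:
--                 return '"'
--         return None
--
--     out: List[str] = []
--     n = len(lines)
--     i = 0
--     while i < n:
--         line = lines[i]
--         q = _start_quote(line)
--         if q is None:
--             out.append(line)
--             i += 1
--             continue
--         span = [line]
--         total = _count_unescaped(line, q)
--         j = i + 1
--         closed = False
--         while j < n:
--             span.append(lines[j])
--             total += _count_unescaped(lines[j], q)
--             j += 1
--             if total % 2 == 0:
--                 closed = True
--                 break
--         joined = " ".join(part.strip() for part in span)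
--         if not closed:
--             if q == "'" and not joined.strip().endswith("')"):
--                 joined = f"{joined}')"
--             elif q == '"' and not joined.strip().endswith('")'):
--                 joined = f'{joined}")'
--         out.append(joined)
--         i = j
--     return out
-- ===== Notes on version B (the rewrite author's own statement) =====
-- stated objective: alternative
-- what changed: Replaced A's single fold with a buffer/quote-char state machine that re-sums unescaped-quote counts over the whole buffer after every appended line by an explicit index scan whose inner span loop maintains a running quote count incrementally.
import Mathlib
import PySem

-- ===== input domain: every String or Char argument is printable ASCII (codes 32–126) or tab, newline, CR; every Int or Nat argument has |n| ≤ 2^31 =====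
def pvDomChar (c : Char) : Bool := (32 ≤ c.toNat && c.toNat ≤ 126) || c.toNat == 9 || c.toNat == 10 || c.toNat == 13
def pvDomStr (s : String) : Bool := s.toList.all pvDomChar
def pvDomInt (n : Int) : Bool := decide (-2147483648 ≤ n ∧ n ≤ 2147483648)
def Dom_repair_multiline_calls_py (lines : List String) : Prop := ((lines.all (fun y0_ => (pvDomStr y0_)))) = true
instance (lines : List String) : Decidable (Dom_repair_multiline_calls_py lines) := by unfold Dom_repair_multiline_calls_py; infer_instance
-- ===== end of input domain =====

-- B replaces A's buffer/flag state machine (which re-sums the whole buffer's quote counts each line)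
-- with an explicit index scan whose inner span loop keeps a running quote count; objective: alternative decomposition.


-- ===== PORT A =====
-- _count_unescaped: loop over the characters with (count, escaped) state (identical helper in A and B)
def countU (text : String) (q : Char) : Int :=
  (text.toList.foldl
    (fun (st : Int × Bool) ch =>
      if st.2 then (st.1, false)
      else if ch == '\\' then (st.1, true)
      else if ch == q then (st.1 + 1, st.2)
      else st)
    (0, false)).1

-- '"insert_text(" in line or ...'
def hasInsert (line : String) : Bool :=
  PySem.Str.isIn "insert_text(" line || PySem.Str.isIn "insert_equation(" line ||
    PySem.Str.isIn "insert_latex_equation(" line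

-- '" ".join(part.strip() for part in parts)'
def joinStrip (parts : List String) : String :=
  PySem.Str.join " " (parts.map (fun p => PySem.Str.strip p))

-- the trailing unclosed-quote fix-up (identical code in A and B)
def fixTail (q : Char) (joined : String) : String :=
  if q == '\'' && !(PySem.Str.endswith (PySem.Str.strip joined) "')") then joined ++ "')"
  else if q == '"' && !(PySem.Str.endswith (PySem.Str.strip joined) "\")") then joined ++ "\")"
  else joined

-- one iteration of A's 'for line in lines' over the state (repaired, buffer, quote_char)
def stepA (st : List String × List String × Option Char) (line : String) :
    List String × List String × Option Char :=
  match st with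
  | (rep, buf, none) =>
    if hasInsert line then
      if PySem.Int.mod (countU line '\'') 2 == 1 then (rep, [line], some '\'')
      else if PySem.Int.mod (countU line '"') 2 == 1 then (rep, [line], some '"')
      else (rep ++ [line], buf, none)
    else (rep ++ [line], buf, none)
  | (rep, buf, some q) =>
    let buf' := buf ++ [line]
    let count := (buf'.map (fun c => countU c q)).sum
    if PySem.Int.mod count 2 == 0 then (rep ++ [joinStrip buf'], [], none)
    else (rep, buf', some q)

-- A's trailing 'if buffer: …'
def finishA (st : List String × List String × Option Char) : List String :=
  match st with
  | (rep, buf, qc) =>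
    if buf.isEmpty then rep
    else
      let joined := joinStrip buf
      rep ++ [match qc with | some q => fixTail q joined | none => joined]

def repair_multiline_calls_py (lines : List String) : List String :=
  finishA (lines.foldl stepA ([], [], none))

-- ===== PORT B =====
-- B's helper _start_quote
def startQuote (line : String) : Option Char :=
  if hasInsert line then
    if PySem.Int.mod (countU line '\'') 2 == 1 then some '\''
    else if PySem.Int.mod (countU line '"') 2 == 1 then some '"'
    else none
  else none

-- B's inner 'while j < n' loop: returns (span, remaining lines, closed)
def scanSpan (q : Char) (span : List String) (total : Int) :
    List String → List String × List String × Bool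
  | [] => (span, [], false)
  | l :: rest =>
    let span' := span ++ [l]
    let total' := total + countU l q
    if PySem.Int.mod total' 2 == 0 then (span', rest, true)
    else scanSpan q span' total' rest

theorem scanSpan_rem_le (q : Char) :
    ∀ (ls span : List String) (total : Int), (scanSpan q span total ls).2.1.length ≤ ls.length := by
  intro ls
  induction ls with
  | nil => intro span total; simp [scanSpan]
  | cons l rest ih =>
    intro span total
    simp only [scanSpan]
    split
    · simp
    · exact Nat.le_trans (ih _ _) (Nat.le_succ _)

-- B's outer 'while i < n' loop
def loopB : List String → List String
  | [] => []
  | line :: rest =>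
    match startQuote line with
    | none => line :: loopB rest
    | some q =>
      let r := scanSpan q [line] (countU line q) rest
      let joined := joinStrip r.1
      (if r.2.2 then joined else fixTail q joined) :: loopB r.2.1
termination_by ls => ls.length
decreasing_by
  · simp
  · exact Nat.lt_succ_of_le (scanSpan_rem_le q rest [line] (countU line q))

def repair_multiline_calls_py_alt (lines : List String) : List String := loopB lines

-- ===== PRECONDITION & SPEC =====
def Spec_repair_multiline_calls_py (lines : List String) (out : List String) : Prop := out = repair_multiline_calls_py_alt lines
instance (lines : List String) (out : List String) : Decidable (Spec_repair_multiline_calls_py lines out) := by unfold Spec_repair_multiline_calls_py; infer_instance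

-- ===== CLAIM (what is proved, stated in full; the proofs are below) =====
def Claim_equal_repair_multiline_calls_py : Prop := ∀ (lines : List String), Dom_repair_multiline_calls_py lines → Spec_repair_multiline_calls_py lines (repair_multiline_calls_py lines)

-- ===== LEMMAS AND PROOFS =====

theorem scanSpan_rem_nil_of_not_closed (q : Char) :
    ∀ (ls span : List String) (total : Int),
      (scanSpan q span total ls).2.2 = false → (scanSpan q span total ls).2.1 = [] := by
  intro ls
  induction ls with
  | nil => intro span total _; simp [scanSpan]
  | cons l rest ih =>
    intro span total h
    simp only [scanSpan] at h ⊢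
    by_cases hc : (PySem.Int.mod (total + countU l q) 2 == 0) = true
    · rw [if_pos hc] at h; exact absurd h (by simp)
    · rw [if_neg hc] at h ⊢; exact ih _ _ h

theorem stepA_none (rep buf : List String) (line : String) :
    stepA (rep, buf, none) line =
      match startQuote line with
      | none => (rep ++ [line], buf, none)
      | some q => (rep, [line], some q) := by
  simp only [stepA, startQuote]
  split_ifs <;> rfl

theorem spanA (q : Char) :
    ∀ (ls rep buf : List String), buf ≠ [] →
      ∀ (sp rem : List String) (cl : Bool),
        scanSpan q buf ((buf.map (fun c => countU c q)).sum) ls = (sp, rem, cl) →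
        finishA (ls.foldl stepA (rep, buf, some q)) =
          if cl then finishA (rem.foldl stepA (rep ++ [joinStrip sp], [], none))
          else rep ++ [fixTail q (joinStrip sp)] := by
  intro ls
  induction ls with
  | nil =>
    intro rep buf hbuf sp rem cl h
    simp only [scanSpan] at h
    injection h with h1 h2; injection h2 with h2 h3
    subst h1; subst h2; subst h3
    simp only [List.foldl_nil, finishA]
    rw [if_neg (by simpa [List.isEmpty_iff] using hbuf)]
    simp
  | cons l rest ih =>
    intro rep buf hbuf sp rem cl h
    have hsum : ((buf ++ [l]).map (fun c => countU c q)).sum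
        = (buf.map (fun c => countU c q)).sum + countU l q := by
      simp
    simp only [scanSpan] at h
    simp only [List.foldl_cons, stepA, hsum]
    by_cases hc : (PySem.Int.mod ((buf.map (fun c => countU c q)).sum + countU l q) 2 == 0) = true
    · rw [if_pos hc] at h
      injection h with h1 h2; injection h2 with h2 h3
      subst h1; subst h2; subst h3
      rw [if_pos hc]
      simp
    · rw [if_neg hc] at h
      rw [if_neg hc]
      exact ih rep (buf ++ [l]) (by simp) sp rem cl (by rw [hsum]; exact h)

theorem mainAB : ∀ (n : Nat) (ls : List String), ls.length ≤ n →
    ∀ rep, finishA (ls.foldl stepA (rep, [], none)) = rep ++ loopB ls := by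
  intro n
  induction n with
  | zero =>
    intro ls hls rep
    have : ls = [] := List.eq_nil_of_length_eq_zero (Nat.le_zero.mp hls)
    subst this
    simp [loopB, finishA]
  | succ n ih =>
    intro ls hls rep
    match ls with
    | [] => simp [loopB, finishA]
    | line :: rest =>
      have hrest : rest.length ≤ n := Nat.succ_le_succ_iff.mp hls
      simp only [List.foldl_cons, stepA_none]
      cases hq : startQuote line with
      | none =>
        simp only [hq]
        rw [ih rest hrest (rep ++ [line])]
        simp [loopB, hq]
      | some q =>
        simp only [hq]
        rcases hscan : scanSpan q [line] (countU line q) rest with ⟨sp, rem, cl⟩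
        have hsum1 : (([line].map (fun c => countU c q)).sum) = countU line q := by simp
        have := spanA q rest rep [line] (by simp) sp rem cl (by rw [hsum1]; exact hscan)
        rw [this]
        cases cl with
        | true =>
          rw [if_pos rfl]
          have hrem : rem.length ≤ n :=
            Nat.le_trans (by have := scanSpan_rem_le q rest [line] (countU line q); rw [hscan] at this; exact this) hrest
          rw [ih rem hrem (rep ++ [joinStrip sp])]
          simp only [loopB, hq, hscan]
          simp
        | false =>
          rw [if_neg (by simp)]
          have hnil : rem = [] := by
            have := scanSpan_rem_nil_of_not_closed q rest [line] (countU line q)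
            rw [hscan] at this; exact this rfl
          simp only [loopB, hq, hscan, hnil]
          simp [loopB]

-- ===== VERDICT (by name: the statement is the Claim_ definition above) =====
theorem repair_multiline_calls_py_spec : Claim_equal_repair_multiline_calls_py := by
  intro lines _
  unfold Spec_repair_multiline_calls_py repair_multiline_calls_py repair_multiline_calls_py_alt
  simpa using mainAB lines.length lines (Nat.le_refl _) []
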